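-- pv_equiv track=rewrite | github.com/Steven9408/Algorithm_Study | SWEA/SSAFY/13_greedy/5203.py | find_run
-- ===== SOURCE A (Python) =====
-- def find_run(arr):
--     N = 10
--     cnt = 0
--     run = False
--     run_idexes= []
--     for i in range(N):
--         if arr[i]:
--             cnt += 1
--             run_idexes.append(i)
--         else:
--             cnt = 0
--             run_idexes = []
--         if cnt == 3:
--             run = True
--             break
--     if run:
--         for i in range(len(run_idexes)):
--             arr[run_idexes[i]] -= 1
--     return run, arr
-- ===== SOURCE B (Python) =====
-- def find_run(arr):
--     for i in range(8):
--         a, b, c = arr[i], arr[i + 1], arr[i + 2]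
--         if a and b and c:
--             arr[i] -= 1
--             arr[i + 1] -= 1
--             arr[i + 2] -= 1
--             return True, arr
--     return False, arr
-- ===== Notes on version B (the rewrite author's own statement) =====
-- stated objective: simpler
-- what changed: Replaces the running counter with its run_idexes accumulator and separate decrement pass by a direct fixed-window scan that tests each triple (arr[i], arr[i+1], arr[i+2]) and decrements it in place on the first hit.
import Mathlib
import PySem

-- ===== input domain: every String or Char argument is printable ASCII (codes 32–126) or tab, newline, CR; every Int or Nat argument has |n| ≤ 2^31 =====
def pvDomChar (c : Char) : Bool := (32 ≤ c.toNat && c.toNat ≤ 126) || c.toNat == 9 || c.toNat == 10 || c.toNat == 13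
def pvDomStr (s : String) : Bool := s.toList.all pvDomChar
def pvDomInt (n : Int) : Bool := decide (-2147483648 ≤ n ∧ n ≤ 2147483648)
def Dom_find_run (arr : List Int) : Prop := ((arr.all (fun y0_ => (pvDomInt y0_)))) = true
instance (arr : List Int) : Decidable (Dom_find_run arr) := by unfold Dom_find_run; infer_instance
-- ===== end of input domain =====

-- B replaces A's running counter + index accumulator + separate decrement pass by a
-- direct fixed-window scan (simpler decomposition, same first-triple semantics).
-- Both A and B mutate `arr` in place in Python; the equivalence here is about the
-- returned pair (which contains the mutated list).

-- ===== PORT A =====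
-- A's for-loop with break, state (cnt, run_idexes); `none` models the IndexError of arr[i].
def findRunLoopA (arr : List Int) (i : Nat) (cnt : Nat) (idxs : List Nat) :
    Option (Bool × List Nat) :=
  if _h : i < 10 then
    match PySem.List.pyGet? arr (Int.ofNat i) with
    | none => none
    | some v =>
      let st := if v ≠ 0 then (cnt + 1, idxs ++ [i]) else (0, ([] : List Nat))
      if st.1 == 3 then some (true, st.2)
      else findRunLoopA arr (i + 1) st.1 st.2
  else some (false, idxs)
termination_by 10 - i

def find_run (arr : List Int) : Bool × List Int :=
  match findRunLoopA arr 0 0 [] with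
  | none => (false, arr)   -- unreachable under Pre_find_run (IndexError in Python)
  | some (run, idxs) =>
    if run then (true, idxs.foldl (fun a j => a.modify j (· - 1)) arr)
    else (false, arr)

-- ===== PORT B =====
-- B's fixed-window scan; `none` models the IndexError of one of the three subscripts.
def findRunLoopB (arr : List Int) (i : Nat) : Option (Bool × List Int) :=
  if _h : i < 8 then
    match PySem.List.pyGet? arr (Int.ofNat i), PySem.List.pyGet? arr (Int.ofNat (i + 1)),
          PySem.List.pyGet? arr (Int.ofNat (i + 2)) with
    | some a, some b, some c =>
      if a ≠ 0 ∧ b ≠ 0 ∧ c ≠ 0 then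
        some (true, ((arr.modify i (· - 1)).modify (i + 1) (· - 1)).modify (i + 2) (· - 1))
      else findRunLoopB arr (i + 1)
    | _, _, _ => none
  else some (false, arr)
termination_by 8 - i

def find_run_alt (arr : List Int) : Bool × List Int :=
  match findRunLoopB arr 0 with
  | none => (false, arr)   -- unreachable under Pre_find_run (IndexError in Python)
  | some r => r

-- ===== PRECONDITION & SPEC =====
-- Pre_ excludes exactly the inputs where Python A raises IndexError: arrays shorter
-- than 10 that contain no fully in-bounds window of three consecutive nonzero entries.
def Pre_find_run (arr : List Int) : Prop :=
  10 ≤ arr.length ∨ ∃ i, i < 8 ∧ i + 2 < arr.length ∧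
    arr.getD i 0 ≠ 0 ∧ arr.getD (i + 1) 0 ≠ 0 ∧ arr.getD (i + 2) 0 ≠ 0
instance (arr : List Int) : Decidable (Pre_find_run arr) := by unfold Pre_find_run; infer_instance
def pvWitness_find_run : List Int := [5, 1, 3]
def Spec_find_run (arr : List Int) (out : Bool × List Int) : Prop := out = find_run_alt arr
instance (arr : List Int) (out : Bool × List Int) : Decidable (Spec_find_run arr out) := by unfold Spec_find_run; infer_instance

-- ===== CLAIM =====
def Claim_equal_find_run : Prop :=
  ∀ (arr : List Int), Dom_find_run arr → Pre_find_run arr → Spec_find_run arr (find_run arr)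

-- ===== LEMMAS AND PROOFS =====

-- truthiness of index j (in bounds and nonzero)
def pvT (arr : List Int) (j : Nat) : Prop := j < arr.length ∧ arr.getD j 0 ≠ 0

-- window of three truthy entries starting at j
def pvW (arr : List Int) (j : Nat) : Prop := pvT arr j ∧ pvT arr (j + 1) ∧ pvT arr (j + 2)

lemma pvGet_some (arr : List Int) (j : Nat) (h : j < arr.length) :
    PySem.List.pyGet? arr (Int.ofNat j) = some (arr.getD j 0) := by
  have h1 : PySem.List.pyGet? arr (Int.ofNat j) = arr[j]? := by
    simp
  rw [h1, List.getElem?_eq_getElem h, List.getD_eq_getElem arr 0 h]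

-- B-side loop: first truthy window i0 is found
lemma pvLB1 (arr : List Int) (i0 : Nat) (h8 : i0 < 8) (hW : pvW arr i0) :
    ∀ k s, s + k = i0 → (∀ j, s ≤ j → j < i0 → ¬ pvW arr j) →
    findRunLoopB arr s =
      some (true, ((arr.modify i0 (· - 1)).modify (i0 + 1) (· - 1)).modify (i0 + 2) (· - 1)) := by
  intro k
  induction k with
  | zero =>
    intro s hs _
    rw [show s = i0 by omega]
    rw [findRunLoopB, dif_pos h8, pvGet_some arr i0 hW.1.1, pvGet_some arr (i0+1) hW.2.1.1,
        pvGet_some arr (i0+2) hW.2.2.1]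
    simp only []
    rw [if_pos ⟨hW.1.2, hW.2.1.2, hW.2.2.2⟩]
  | succ k ih =>
    intro s hs hfirst
    have hlt : s < i0 := by omega
    have hlen : i0 + 2 < arr.length := hW.2.2.1
    have h1 : s < arr.length := by omega
    have h2 : s + 1 < arr.length := by omega
    have h3 : s + 2 < arr.length := by omega
    rw [findRunLoopB, dif_pos (by omega : s < 8), pvGet_some arr s h1, pvGet_some arr (s+1) h2,
        pvGet_some arr (s+2) h3]
    have hnW : ¬ pvW arr s := hfirst s le_rfl hlt
    have hcond : ¬ (arr.getD s 0 ≠ 0 ∧ arr.getD (s+1) 0 ≠ 0 ∧ arr.getD (s+2) 0 ≠ 0) := by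
      intro ⟨a, b, c⟩
      exact hnW ⟨⟨h1, a⟩, ⟨h2, b⟩, ⟨h3, c⟩⟩
    simp only []
    rw [if_neg hcond]
    exact ih (s + 1) (by omega) (fun j hj hj' => hfirst j (by omega) hj')

-- B-side loop: no truthy window, long enough array
lemma pvLB2 (arr : List Int) (hlen : 10 ≤ arr.length) :
    ∀ k s, s + k = 8 → (∀ j, s ≤ j → j < 8 → ¬ pvW arr j) →
    findRunLoopB arr s = some (false, arr) := by
  intro k
  induction k with
  | zero =>
    intro s hs _
    rw [findRunLoopB, dif_neg (by omega : ¬ s < 8)]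
  | succ k ih =>
    intro s hs hfirst
    have h8 : s < 8 := by omega
    have h1 : s < arr.length := by omega
    have h2 : s + 1 < arr.length := by omega
    have h3 : s + 2 < arr.length := by omega
    rw [findRunLoopB, dif_pos h8, pvGet_some arr s h1, pvGet_some arr (s+1) h2,
        pvGet_some arr (s+2) h3]
    have hcond : ¬ (arr.getD s 0 ≠ 0 ∧ arr.getD (s+1) 0 ≠ 0 ∧ arr.getD (s+2) 0 ≠ 0) := by
      intro ⟨a, b, c⟩
      exact hfirst s le_rfl h8 ⟨⟨h1, a⟩, ⟨h2, b⟩, ⟨h3, c⟩⟩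
    simp only []
    rw [if_neg hcond]
    exact ih (s + 1) (by omega) (fun j hj hj' => hfirst j (by omega) hj')

-- A-side loop: breaks exactly at the end of the first truthy window
lemma pvLA1 (arr : List Int) (i0 : Nat) (h8 : i0 < 8) (hW : pvW arr i0) :
    ∀ k i cnt, i + k = i0 + 2 → cnt ≤ 2 → cnt ≤ i → i - cnt ≤ i0 →
    (∀ j, i - cnt ≤ j → j < i → pvT arr j) →
    (∀ j, i - cnt ≤ j → j < i0 → ¬ pvW arr j) →
    findRunLoopA arr i cnt (List.range' (i - cnt) cnt) =
      some (true, [i0, i0 + 1, i0 + 2]) := by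
  intro k
  induction k with
  | zero =>
    intro i cnt hik hc2 hci hle htrue _
    have hii : i = i0 + 2 := by omega
    subst hii
    have hc : cnt = 2 := by omega
    subst hc
    rw [findRunLoopA, dif_pos (by omega : i0 + 2 < 10), pvGet_some arr (i0+2) hW.2.2.1]
    simp only [if_pos hW.2.2.2]
    have : i0 + 2 - 2 = i0 := by omega
    rw [this]
    norm_num [List.range']
  | succ k ih =>
    intro i cnt hik hc2 hci hle htrue hfirst
    have hi2 : i < i0 + 2 := by omega
    have hilen : i < arr.length := by have := hW.2.2.1; omega
    rw [findRunLoopA, dif_pos (by omega : i < 10), pvGet_some arr i hilen]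
    by_cases hv : arr.getD i 0 = 0
    · -- falsy: reset
      have hi0 : i < i0 := by
        by_contra hcon
        have : pvT arr i := by
          rcases (by omega : i = i0 ∨ i = i0 + 1) with h | h
          · exact h ▸ hW.1
          · exact h ▸ hW.2.1
        exact this.2 hv
      simp only [hv, ne_eq, not_true_eq_false, if_false]
      norm_num
      have heq : findRunLoopA arr (i+1) 0 (List.range' (i + 1 - 0) 0) =
          some (true, [i0, i0 + 1, i0 + 2]) :=
        ih (i+1) 0 (by omega) (by omega) (by omega) (by omega)
          (fun j hj hj' => absurd hj' (by omega))
          (fun j hj hj' => hfirst j (by omega) hj')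
      simpa [List.range'] using heq
    · -- truthy: extend the run
      have hcnt1 : cnt ≤ 1 := by
        by_contra hcon
        have hc : cnt = 2 := by omega
        have hwi : pvW arr (i - 2) := by
          refine ⟨htrue (i-2) (by omega) (by omega), ?_, ?_⟩
          · have := htrue (i-1) (by omega) (by omega)
            have h : i - 2 + 1 = i - 1 := by omega
            rwa [h]
          · have h : i - 2 + 2 = i := by omega
            rw [h]; exact ⟨hilen, hv⟩
        have h1 : i - 2 ≥ i0 := by
          by_contra hcon2
          exact hfirst (i-2) (by omega) (by omega) hwi
        omega
      simp only [hv, ne_eq, not_false_eq_true, if_true]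
      have hne : ¬ (cnt + 1 == 3) = true := by
        simp only [beq_iff_eq]; omega
      rw [if_neg hne]
      have hconcat : List.range' (i - cnt) cnt ++ [i] = List.range' (i + 1 - (cnt + 1)) (cnt + 1) := by
        have h : i + 1 - (cnt + 1) = i - cnt := by omega
        rw [h, List.range'_concat]
        congr 2
        omega
      rw [hconcat]
      exact ih (i+1) (cnt+1) (by omega) (by omega) (by omega) (by omega)
        (fun j hj hj' => by
          rcases (by omega : j < i ∨ j = i) with h | h
          · exact htrue j (by omega) h
          · exact h ▸ ⟨hilen, hv⟩)
        (fun j hj hj' => hfirst j (by omega) hj')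

-- A-side loop: no truthy window, long enough array -> finishes with run = false
lemma pvLA2 (arr : List Int) (hlen : 10 ≤ arr.length) :
    ∀ k i cnt, i + k = 10 → cnt ≤ 2 → cnt ≤ i →
    (∀ j, i - cnt ≤ j → j < i → pvT arr j) →
    (∀ j, i - cnt ≤ j → j < 8 → ¬ pvW arr j) →
    ∃ l, findRunLoopA arr i cnt (List.range' (i - cnt) cnt) = some (false, l) := by
  intro k
  induction k with
  | zero =>
    intro i cnt hik _ _ _ _
    refine ⟨List.range' (i - cnt) cnt, ?_⟩
    rw [findRunLoopA, dif_neg (by omega : ¬ i < 10)]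
  | succ k ih =>
    intro i cnt hik hc2 hci htrue hfirst
    have hilen : i < arr.length := by omega
    rw [findRunLoopA, dif_pos (by omega : i < 10), pvGet_some arr i hilen]
    by_cases hv : arr.getD i 0 = 0
    · simp only [hv, ne_eq, not_true_eq_false, if_false]
      norm_num
      have := ih (i+1) 0 (by omega) (by omega) (by omega)
        (fun j hj hj' => absurd hj' (by omega))
        (fun j hj hj' => hfirst j (by omega) hj')
      simpa [List.range'] using this
    · have hcnt1 : cnt ≤ 1 := by
        by_contra hcon
        have hc : cnt = 2 := by omega
        have hwi : pvW arr (i - 2) := by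
          refine ⟨htrue (i-2) (by omega) (by omega), ?_, ?_⟩
          · have := htrue (i-1) (by omega) (by omega)
            have h : i - 2 + 1 = i - 1 := by omega
            rwa [h]
          · have h : i - 2 + 2 = i := by omega
            rw [h]; exact ⟨hilen, hv⟩
        exact hfirst (i-2) (by omega) (by omega) hwi
      simp only [hv, ne_eq, not_false_eq_true, if_true]
      have hne : ¬ (cnt + 1 == 3) = true := by
        simp only [beq_iff_eq]; omega
      rw [if_neg hne]
      have hconcat : List.range' (i - cnt) cnt ++ [i] = List.range' (i + 1 - (cnt + 1)) (cnt + 1) := by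
        have h : i + 1 - (cnt + 1) = i - cnt := by omega
        rw [h, List.range'_concat]
        congr 2
        omega
      rw [hconcat]
      exact ih (i+1) (cnt+1) (by omega) (by omega) (by omega)
        (fun j hj hj' => by
          rcases (by omega : j < i ∨ j = i) with h | h
          · exact htrue j (by omega) h
          · exact h ▸ ⟨hilen, hv⟩)
        (fun j hj hj' => hfirst j (by omega) hj')

-- ===== VERDICT =====
theorem find_run_spec : Claim_equal_find_run := by
  intro arr _hdom hpre
  unfold Spec_find_run
  haveI : DecidablePred (fun i => i < 8 ∧ pvW arr i) := fun _ => Classical.dec _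
  by_cases hex : ∃ i, i < 8 ∧ pvW arr i
  · -- minimal truthy window
    have hmin := Nat.find_spec hex
    set i0 := Nat.find hex with hi0
    have h8 : i0 < 8 := hmin.1
    have hW : pvW arr i0 := hmin.2
    have hfirst : ∀ j, j < i0 → ¬ pvW arr j := fun j hj hw =>
      Nat.find_min hex hj ⟨by omega, hw⟩
    have hA := pvLA1 arr i0 h8 hW (i0 + 2) 0 0 (by omega) (by omega) (by omega) (by omega)
      (fun j hj hj' => absurd hj' (by omega)) (fun j _ hj' => hfirst j hj')
    have hB := pvLB1 arr i0 h8 hW i0 0 (by omega) (fun j _ hj' => hfirst j hj')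
    unfold find_run find_run_alt
    simp only [List.range'] at hA
    rw [hA, hB]
    simp [List.foldl]
  · have hfirst : ∀ j, j < 8 → ¬ pvW arr j := fun j hj hw => hex ⟨j, hj, hw⟩
    have hlen : 10 ≤ arr.length := by
      rcases hpre with h | ⟨i, hi8, hib, ha, hb, hc⟩
      · exact h
      · exact absurd ⟨⟨by omega, ha⟩, ⟨by omega, hb⟩, ⟨by omega, hc⟩⟩ (hfirst i hi8)
    obtain ⟨l, hA⟩ := pvLA2 arr hlen 10 0 0 (by omega) (by omega) (by omega)
      (fun j hj hj' => absurd hj' (by omega)) (fun j _ hj' => hfirst j hj')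
    have hB := pvLB2 arr hlen 8 0 (by omega) (fun j _ hj' => hfirst j hj')
    unfold find_run find_run_alt
    simp only [List.range'] at hA
    rw [hA, hB]
    simp
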